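-- pv_equiv track=rewrite | github.com/Chmiellu/TSPGreedyWay | TSP/all_pairs.py | select_next_node
-- ===== SOURCE A (Python) =====
-- def select_next_node(G, current_node, visited):
--     min_distance = float('inf')
--     next_node = None
--     for node in G:
--         if node not in visited and node != current_node:
--             for neighbor in G[node]:
--                 if neighbor != current_node and neighbor not in visited:
--                     distance = G[node][current_node] + G[node][neighbor]
--                     if distance < min_distance:
--                         min_distance = distance
--                         next_node = node
--     return next_node
-- ===== SOURCE B (Python) =====
-- def select_next_node(G, current_node, visited):
--     blocked = set(visited)
--     blocked.add(current_node)
--     ranked = sorted(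
--         (nbrs[current_node] + min(d for nb, d in nbrs.items() if nb not in blocked), i, node)
--         for i, (node, nbrs) in enumerate(G.items())
--         if node not in blocked and any(nb not in blocked for nb in nbrs)
--     )
--     return ranked[0][2] if ranked else None
-- ===== Notes on version B (the rewrite author's own statement) =====
-- stated objective: alternative
-- what changed: A's running-min scan with mutable best-so-far state is replaced by a sort-based selection: build blocked = set(visited)|{current_node}, materialize one (score, index, node) triple per eligible node, sort the triples lexicographically (index breaks score ties, so the first minimal node of A's scan order wins), and return the head's node. Pre_ additionally requires key-nodup association lists (automatic for Python dicts) and excludes inputs where A raises KeyError (current_node missing from an eligible node's neighbor dict).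
import Mathlib
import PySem

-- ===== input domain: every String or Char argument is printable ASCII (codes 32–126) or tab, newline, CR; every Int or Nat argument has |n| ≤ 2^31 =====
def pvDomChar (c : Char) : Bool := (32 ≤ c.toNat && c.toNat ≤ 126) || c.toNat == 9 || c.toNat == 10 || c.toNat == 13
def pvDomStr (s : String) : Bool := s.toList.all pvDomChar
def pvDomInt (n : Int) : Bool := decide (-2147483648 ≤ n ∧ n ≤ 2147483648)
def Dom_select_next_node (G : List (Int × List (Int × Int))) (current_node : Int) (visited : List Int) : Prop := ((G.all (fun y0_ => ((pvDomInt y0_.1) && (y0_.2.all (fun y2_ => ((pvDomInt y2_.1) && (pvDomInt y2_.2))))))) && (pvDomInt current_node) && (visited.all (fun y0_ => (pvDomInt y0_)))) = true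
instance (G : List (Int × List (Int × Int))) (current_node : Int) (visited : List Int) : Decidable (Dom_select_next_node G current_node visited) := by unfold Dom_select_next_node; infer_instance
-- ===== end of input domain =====

-- B replaces A's running-min scan (mutable best-so-far state) by a sort-based selection:
-- one (score, index, node) triple per eligible node, sorted lexicographically, head wins
-- (objective: alternative algorithm, similar cost).

-- shared dict-lookup helper: Python's d[k] with default (first match; exact where Pre_ holds,
-- Python raises where the key is absent and those inputs are outside Pre_)
def lookD (d : List (Int × Int)) (k v0 : Int) : Int :=
  (((d.find? (fun q => q.1 == k)).map Prod.snd).getD v0)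

-- ===== PORT A =====
-- literal transliteration of A; float('inf') / the unset minimum is modeled as `none`
def select_next_node (G : List (Int × List (Int × Int))) (current_node : Int) (visited : List Int) : Option Int :=
  let st := G.foldl (fun (st : Option Int × Option Int) p =>
      if p.1 ∉ visited ∧ p.1 ≠ current_node then
        p.2.foldl (fun (st : Option Int × Option Int) q =>
          if q.1 ≠ current_node ∧ q.1 ∉ visited then
            let distance := lookD p.2 current_node 0 + lookD p.2 q.1 0
            match st.1 with
            | none => (some distance, some p.1)
            | some m => if distance < m then (some distance, some p.1) else st
          else st) st
      else st)
    ((none : Option Int), (none : Option Int))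
  st.2

-- ===== PORT B =====
-- literal transliteration of Source B: blocked set, (score, index, node) triples, sort, head.
-- Python sorts the triples lexicographically; the index components are pairwise distinct,
-- so the node component never decides a comparison and sorted2 on (score, index) is exact.
-- Python's min(generator) has no default; the `any` guard makes the generator nonempty,
-- so minD's default 0 is never used.
def select_next_node_alt (G : List (Int × List (Int × Int))) (current_node : Int) (visited : List Int) : Option Int :=
  let blocked := PySem.Set.add (PySem.Set.ofList visited) current_node
  let ranked := PySem.List.sorted2
    (((PySem.List.enumerate G 0).filter (fun ip =>
        !(PySem.Set.contains blocked ip.2.1) &&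
        ip.2.2.any (fun q => !(PySem.Set.contains blocked q.1)))).map
      (fun ip =>
        (lookD ip.2.2 current_node 0 +
           PySem.List.minD ((ip.2.2.filter (fun q => !(PySem.Set.contains blocked q.1))).map Prod.snd) (fun x => x) 0,
         ip.1, ip.2.1)))
    (fun t => t.1) (fun t => t.2.1)
  match ranked with
  | [] => none
  | t :: _ => some t.2.2

-- ===== PRECONDITION & SPEC =====
-- Pre_ requires key-nodup association lists (automatic for inputs that come from Python
-- dicts, which cannot carry duplicate keys) and excludes the inputs on which Python A
-- raises KeyError (current_node absent from the neighbor dict of an eligible node that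
-- has a valid neighbor; B raises there too).
def Pre_select_next_node (G : List (Int × List (Int × Int))) (current_node : Int) (visited : List Int) : Prop :=
  (G.map Prod.fst).Nodup ∧
  (∀ p ∈ G, (p.2.map Prod.fst).Nodup) ∧
  (∀ p ∈ G, p.1 ∉ visited → p.1 ≠ current_node →
    (∃ q ∈ p.2, q.1 ≠ current_node ∧ q.1 ∉ visited) → current_node ∈ p.2.map Prod.fst)
instance (G : List (Int × List (Int × Int))) (current_node : Int) (visited : List Int) : Decidable (Pre_select_next_node G current_node visited) := by unfold Pre_select_next_node; infer_instance

def pvWitness_select_next_node : (List (Int × List (Int × Int))) × Int × List Int :=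
  ([(1, [(0, 3), (2, 4)]), (2, [(0, 1), (1, 9)])], 0, [])

def Spec_select_next_node (G : List (Int × List (Int × Int))) (current_node : Int) (visited : List Int) (out : Option Int) : Prop := out = select_next_node_alt G current_node visited
instance (G : List (Int × List (Int × Int))) (current_node : Int) (visited : List Int) (out : Option Int) : Decidable (Spec_select_next_node G current_node visited out) := by unfold Spec_select_next_node; infer_instance

-- ===== CLAIM (what is proved, stated in full; the proofs are below) =====
def Claim_equal_select_next_node : Prop := ∀ (G : List (Int × List (Int × Int))) (current_node : Int) (visited : List Int), Dom_select_next_node G current_node visited → Pre_select_next_node G current_node visited → Spec_select_next_node G current_node visited (select_next_node G current_node visited)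

-- ===== LEMMAS AND PROOFS =====

-- A's min-update step, as a function of the candidate (key, score)
def stepA (k s : Int) (st : Option Int × Option Int) : Option Int × Option Int :=
  match st.1 with
  | none => (some s, some k)
  | some m => if s < m then (some s, some k) else st

-- composing two updates with the same key = one update with the min score
theorem stepA_stepA (k a b : Int) (st : Option Int × Option Int) :
    stepA k b (stepA k a st) = stepA k (min a b) st := by
  rcases st with ⟨m?, n?⟩
  cases m? with
  | none =>
      simp only [stepA, min_def]
      split_ifs <;> simp_all <;> omega
  | some m =>
      simp only [stepA, min_def]
      split_ifs <;> simp_all <;> omega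

-- folding A's step over one node's valid neighbors = one step with base + minimum
theorem foldl_stepA_min (k base : Int) :
    ∀ (qs : List (Int × Int)) (q0 : Int × Int) (st : Option Int × Option Int),
      ((q0 :: qs).foldl (fun st q => stepA k (base + q.2) st) st)
        = stepA k (base + (qs.map Prod.snd).foldl min q0.2) st := by
  intro qs
  induction qs with
  | nil => intro q0 st; rfl
  | cons a qs ih =>
      intro q0 st
      have h1 : ((q0 :: a :: qs).foldl (fun st q => stepA k (base + q.2) st) st)
          = ((a :: qs).foldl (fun st q => stepA k (base + q.2) st) (stepA k (base + q0.2) st)) := rfl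
      rw [h1, ih, stepA_stepA, min_add_add_left]
      congr 2
      rw [List.map_cons, List.foldl_cons, List.foldl_assoc]

-- B's per-node score entry (proof-level description of one candidate of either program)
def entryB (current_node : Int) (visited : List Int) (p : Int × List (Int × Int)) : Option (Int × Int) :=
  if p.1 ∈ visited ∨ p.1 = current_node then none
  else
    match (p.2.filter (fun q => decide (q.1 ≠ current_node ∧ q.1 ∉ visited))).map Prod.snd with
    | [] => none
    | t :: ts => some (p.1, lookD p.2 current_node 0 + ts.foldl min t)

-- first-match lookup returns the pair's own value on a key-nodup list
theorem lookD_mem (d : List (Int × Int)) (hnd : (d.map Prod.fst).Nodup) (q : Int × Int)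
    (hq : q ∈ d) (v0 : Int) : lookD d q.1 v0 = q.2 := by
  induction d with
  | nil => cases hq
  | cons r d ih =>
      simp only [List.map_cons, List.nodup_cons] at hnd
      rcases List.mem_cons.1 hq with h | h
      · subst h; simp [lookD]
      · have hne : r.1 ≠ q.1 := by
          intro he
          exact hnd.1 (he ▸ (List.mem_map.2 ⟨q, h, rfl⟩))
        have hb : (r.1 == q.1) = false := beq_eq_false_iff_ne.mpr hne
        have : lookD (r :: d) q.1 v0 = lookD d q.1 v0 := by
          simp [lookD, List.find?, hb]
        rw [this]; exact ih hnd.2 h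

-- A's inner loop over one node's neighbor list equals one stepA with that node's entryB score
theorem innerA_eq (current_node : Int) (visited : List Int) (p : Int × List (Int × Int))
    (hnd : (p.2.map Prod.fst).Nodup)
    (hp : p.1 ∉ visited ∧ p.1 ≠ current_node)
    (st : Option Int × Option Int) :
    p.2.foldl (fun (st : Option Int × Option Int) q =>
        if q.1 ≠ current_node ∧ q.1 ∉ visited then
          let distance := lookD p.2 current_node 0 + lookD p.2 q.1 0
          match st.1 with
          | none => (some distance, some p.1)
          | some m => if distance < m then (some distance, some p.1) else st
        else st) st
      = (match entryB current_node visited p with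
         | none => st
         | some e => stepA e.1 e.2 st) := by
  have hguard : ¬ (p.1 ∈ visited ∨ p.1 = current_node) := by tauto
  set base := lookD p.2 current_node 0 with hbase
  have hfun : (fun (st : Option Int × Option Int) (q : Int × Int) =>
        if q.1 ≠ current_node ∧ q.1 ∉ visited then
          let distance := base + lookD p.2 q.1 0
          match st.1 with
          | none => (some distance, some p.1)
          | some m => if distance < m then (some distance, some p.1) else st
        else st)
      = (fun st q => if q.1 ≠ current_node ∧ q.1 ∉ visited
          then stepA p.1 (base + lookD p.2 q.1 0) st else st) := by
    funext st q
    by_cases hq : q.1 ≠ current_node ∧ q.1 ∉ visited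
    · simp only [if_pos hq, stepA]
    · rw [if_neg hq, if_neg hq]
  rw [hfun, PySem.List.foldl_ite_eq_foldl_filter]
  have h2 : ∀ q ∈ p.2.filter (fun q => decide (q.1 ≠ current_node ∧ q.1 ∉ visited)),
      lookD p.2 q.1 0 = q.2 := by
    intro q hq
    exact lookD_mem p.2 hnd q (List.mem_of_mem_filter hq) 0
  rw [PySem.List.foldl_congr_mem _ _ (fun st q => stepA p.1 (base + q.2) st) st
        (fun st q hq => by rw [h2 q hq])]
  cases hv : p.2.filter (fun q => decide (q.1 ≠ current_node ∧ q.1 ∉ visited)) with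
  | nil =>
      unfold entryB
      rw [if_neg hguard, hv]
      simp
  | cons q0 qs =>
      unfold entryB
      rw [if_neg hguard, hv, foldl_stepA_min p.1 base qs q0 st]
      simp
      rw [hbase]

-- A's outer fold = fold of stepA over the entryB score list
theorem outerA_eq (current_node : Int) (visited : List Int) :
    ∀ (G : List (Int × List (Int × Int))),
      (∀ p ∈ G, (p.2.map Prod.fst).Nodup) →
      ∀ (st : Option Int × Option Int),
      G.foldl (fun (st : Option Int × Option Int) p =>
        if p.1 ∉ visited ∧ p.1 ≠ current_node then
          p.2.foldl (fun (st : Option Int × Option Int) q =>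
            if q.1 ≠ current_node ∧ q.1 ∉ visited then
              let distance := lookD p.2 current_node 0 + lookD p.2 q.1 0
              match st.1 with
              | none => (some distance, some p.1)
              | some m => if distance < m then (some distance, some p.1) else st
            else st) st
        else st) st
      = (G.filterMap (entryB current_node visited)).foldl (fun st e => stepA e.1 e.2 st) st := by
  intro G
  induction G with
  | nil => intro _ st; rfl
  | cons p G ih =>
      intro hnd st
      simp only [List.foldl_cons, List.filterMap_cons]
      by_cases h : p.1 ∉ visited ∧ p.1 ≠ current_node
      · rw [if_pos h, innerA_eq current_node visited p (hnd p (List.mem_cons_self ..)) h st]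
        cases he : entryB current_node visited p with
        | none => exact ih (fun p hp => hnd p (List.mem_cons_of_mem _ hp)) st
        | some e => simp only [List.foldl_cons]
                    exact ih (fun p hp => hnd p (List.mem_cons_of_mem _ hp)) _
      · have hg : p.1 ∈ visited ∨ p.1 = current_node := by tauto
        have he : entryB current_node visited p = none := by simp [entryB, hg]
        rw [if_neg h, he]
        exact ih (fun p hp => hnd p (List.mem_cons_of_mem _ hp)) st

-- selection from a fold of stepA, starting from a concrete best
theorem foldl_stepA_sel :
    ∀ (S : List (Int × Int)) (k s : Int),
      S.foldl (fun st e => stepA e.1 e.2 st) (some s, some k)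
        = ((some (S.foldl (fun b q => if q.2 < b.2 then q else b) (k, s)).2 : Option Int),
           (some (S.foldl (fun b q => if q.2 < b.2 then q else b) (k, s)).1 : Option Int)) := by
  intro S
  induction S with
  | nil => intro k s; rfl
  | cons e S ih =>
      intro k s
      simp only [List.foldl_cons, stepA]
      by_cases h : e.2 < s
      · simp only [if_pos h]; exact ih e.1 e.2
      · simp only [if_neg h]; exact ih k s

-- the final extraction of A = first-minimum selection over the score list
theorem sel_eq (S : List (Int × Int)) :
    (S.foldl (fun st e => stepA e.1 e.2 st) ((none : Option Int), (none : Option Int))).2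
      = (match S with
         | [] => none
         | (k0, s0) :: rest => some (rest.foldl (fun b q => if q.2 < b.2 then q else b) (k0, s0)).1) := by
  cases S with
  | nil => rfl
  | cons e S =>
      simp only [List.foldl_cons]
      have h0 : stepA e.1 e.2 ((none : Option Int), (none : Option Int)) = (some e.2, some e.1) := rfl
      rw [h0, foldl_stepA_sel S e.1 e.2]

-- membership in B's blocked set, as the predicate A tests
theorem blocked_pred (current_node : Int) (visited : List Int) :
    (fun x : Int => !(PySem.Set.contains (PySem.Set.add (PySem.Set.ofList visited) current_node) x))
      = (fun x : Int => decide (x ≠ current_node ∧ x ∉ visited)) := by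
  funext x
  have hm : x ∈ PySem.Set.add (PySem.Set.ofList visited) current_node ↔ x ∈ visited ∨ x = current_node := by
    rw [PySem.Set.mem_add, PySem.Set.mem_ofList]
  simp only [PySem.Set.contains, List.contains_eq_mem, hm]
  by_cases h1 : x = current_node <;> by_cases h2 : x ∈ visited <;> simp [h1, h2]

-- filter-then-map comprehension = filterMap, pointwise
theorem filter_map_eq_filterMap {α β : Type} (g : α → Bool) (f : α → β) (h : α → Option β)
    (H : ∀ x, h x = if g x then some (f x) else none) :
    ∀ (l : List α), (l.filter g).map f = l.filterMap h := by
  intro l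
  induction l with
  | nil => simp
  | cons a l ih =>
      by_cases hg : g a <;>
        simp [H, hg, ih]

-- B's candidate triple for one enumerated entry (proof-level)
def triB (current_node : Int) (visited : List Int) (ip : Int × Int × List (Int × Int)) :
    Option (Int × Int × Int) :=
  (entryB current_node visited ip.2).map (fun e => (e.2, ip.1, e.1))

-- B's comprehension builds exactly the triB candidates
theorem cands_eq (G : List (Int × List (Int × Int))) (current_node : Int) (visited : List Int) :
    (((PySem.List.enumerate G 0).filter (fun ip =>
        !(PySem.Set.contains (PySem.Set.add (PySem.Set.ofList visited) current_node) ip.2.1) &&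
        ip.2.2.any (fun q => !(PySem.Set.contains (PySem.Set.add (PySem.Set.ofList visited) current_node) q.1)))).map
      (fun ip =>
        (lookD ip.2.2 current_node 0 +
           PySem.List.minD ((ip.2.2.filter (fun q => !(PySem.Set.contains (PySem.Set.add (PySem.Set.ofList visited) current_node) q.1))).map Prod.snd) (fun x => x) 0,
         ip.1, ip.2.1)))
      = (PySem.List.enumerate G 0).filterMap (triB current_node visited) := by
  apply filter_map_eq_filterMap
  intro ip
  have hbp := blocked_pred current_node visited
  have hb1 : (!(PySem.Set.contains (PySem.Set.add (PySem.Set.ofList visited) current_node) ip.2.1))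
      = decide (ip.2.1 ≠ current_node ∧ ip.2.1 ∉ visited) := congrFun hbp ip.2.1
  have hb2 : (fun q : Int × Int => !(PySem.Set.contains (PySem.Set.add (PySem.Set.ofList visited) current_node) q.1))
      = (fun q : Int × Int => decide (q.1 ≠ current_node ∧ q.1 ∉ visited)) := by
    funext q; exact congrFun hbp q.1
  unfold triB entryB
  rw [hb1, hb2]
  by_cases hg : ip.2.1 ∈ visited ∨ ip.2.1 = current_node
  · have : ¬ (ip.2.1 ≠ current_node ∧ ip.2.1 ∉ visited) := by tauto
    simp [if_pos hg, this]
  · have hok : ip.2.1 ≠ current_node ∧ ip.2.1 ∉ visited := by tauto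
    rw [if_neg hg]
    cases hv : ip.2.2.filter (fun q => decide (q.1 ≠ current_node ∧ q.1 ∉ visited)) with
    | nil =>
        have hany : (ip.2.2.any (fun q => decide (q.1 ≠ current_node ∧ q.1 ∉ visited))) = false := by
          rw [Bool.eq_false_iff]
          intro hc
          obtain ⟨x, hx, hpx⟩ := List.any_eq_true.1 hc
          exact (List.filter_eq_nil_iff.1 hv) x hx hpx
        rw [hany]
        simp [hok]
    | cons q0 qs =>
        have hq0 : q0 ∈ ip.2.2.filter (fun q => decide (q.1 ≠ current_node ∧ q.1 ∉ visited)) := by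
          rw [hv]; exact List.mem_cons_self ..
        have hany : (ip.2.2.any (fun q => decide (q.1 ≠ current_node ∧ q.1 ∉ visited))) = true :=
          List.any_eq_true.2 ⟨q0, (List.mem_filter.1 hq0).1, (List.mem_filter.1 hq0).2⟩
        have hd : decide (ip.2.1 ≠ current_node ∧ ip.2.1 ∉ visited) = true := decide_eq_true hok
        rw [hd, hany, List.map_cons]
        unfold PySem.List.minD
        rw [PySem.List.min?_id_cons]
        rfl

-- the candidates, projected back to (node, score), are exactly the entryB list
theorem tris_map_eq (G : List (Int × List (Int × Int))) (current_node : Int) (visited : List Int) :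
    ((PySem.List.enumerate G 0).filterMap (triB current_node visited)).map (fun t => (t.2.2, t.1))
      = G.filterMap (entryB current_node visited) := by
  rw [List.map_filterMap]
  have h1 : (fun ip : Int × Int × List (Int × Int) =>
        Option.map (fun t : Int × Int × Int => (t.2.2, t.1)) (triB current_node visited ip))
      = (fun ip => entryB current_node visited ip.2) := by
    funext ip
    unfold triB
    rw [Option.map_map]
    cases entryB current_node visited ip.2 <;> simp [Function.comp]
  rw [h1]
  have h2 := PySem.List.map_snd_enumerate G 0
  conv_rhs => rw [← h2]
  rw [List.filterMap_map]
  rfl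

-- the index components of the candidates are strictly increasing
theorem tris_pairwise (G : List (Int × List (Int × Int))) (current_node : Int) (visited : List Int) :
    ((PySem.List.enumerate G 0).filterMap (triB current_node visited)).Pairwise
      (fun a b => a.2.1 < b.2.1) := by
  rw [List.pairwise_filterMap]
  refine (PySem.List.pairwise_lt_enumerate G 0).imp ?_
  intro a b hab x hx y hy
  have hx1 : x.2.1 = a.1 := by
    unfold triB at hx
    cases he : entryB current_node visited a.2 with
    | none => rw [he] at hx; cases hx
    | some e => rw [he] at hx; cases hx; rfl
  have hy1 : y.2.1 = b.1 := by
    unfold triB at hy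
    cases he : entryB current_node visited b.2 with
    | none => rw [he] at hy; cases hy
    | some e => rw [he] at hy; cases hy; rfl
  rw [hx1, hy1]; exact hab

-- first-min selection step on triples (score first, scan order breaks ties)
def stepT (b q : Int × Int × Int) : Int × Int × Int := if q.1 < b.1 then q else b

-- the fold result is the first element of minimal score: it splits the list with strictly
-- larger scores before it and no smaller score anywhere
theorem foldl_stepT_spec :
    ∀ (cs : List (Int × Int × Int)) (c : Int × Int × Int),
      ∃ pre suf, c :: cs = pre ++ (cs.foldl stepT c) :: suf ∧
        (∀ y ∈ pre, (cs.foldl stepT c).1 < y.1) ∧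
        (∀ y ∈ c :: cs, (cs.foldl stepT c).1 ≤ y.1) := by
  intro cs
  induction cs with
  | nil =>
      intro c
      exact ⟨[], [], rfl, by simp, by simp⟩
  | cons a cs ih =>
      intro c
      have hstep : (a :: cs).foldl stepT c = cs.foldl stepT (stepT c a) := rfl
      by_cases h : a.1 < c.1
      · have hca : stepT c a = a := if_pos h
        obtain ⟨pre, suf, heq, hpre, hmin⟩ := ih a
        refine ⟨c :: pre, suf, ?_, ?_, ?_⟩
        · rw [hstep, hca]; simpa using congrArg (c :: ·) heq
        · intro y hy
          rw [hstep, hca]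
          rcases List.mem_cons.1 hy with rfl | hy
          · exact lt_of_le_of_lt (hmin a (List.mem_cons_self ..)) h
          · exact hpre y hy
        · intro y hy
          rw [hstep, hca]
          rcases List.mem_cons.1 hy with rfl | hy
          · exact le_of_lt (lt_of_le_of_lt (hmin a (List.mem_cons_self ..)) h)
          · exact hmin y hy
      · have hca : stepT c a = c := if_neg h
        obtain ⟨pre, suf, heq, hpre, hmin⟩ := ih c
        cases pre with
        | nil =>
            have hr : c = cs.foldl stepT c := by
              have := heq; simp at this; exact this.1
            refine ⟨[], a :: cs, ?_, by simp, ?_⟩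
            · rw [hstep, hca, ← hr]; rfl
            · intro y hy
              rw [hstep, hca]
              rcases List.mem_cons.1 hy with rfl | hy
              · exact le_of_eq (congrArg Prod.fst hr).symm
              · rcases List.mem_cons.1 hy with rfl | hy
                · exact le_trans (le_of_eq (congrArg Prod.fst hr).symm) (le_of_not_gt h)
                · exact hmin y (List.mem_cons_of_mem _ hy)
        | cons p pre' =>
            have hc : c = p ∧ cs = pre' ++ (cs.foldl stepT c) :: suf := by
              have := heq; simp at this; exact ⟨this.1, this.2⟩
            have hrc : (cs.foldl stepT c).1 < c.1 := by
              have := hpre p (List.mem_cons_self ..)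
              rw [← hc.1] at this; exact this
            refine ⟨c :: a :: pre', suf, ?_, ?_, ?_⟩
            · rw [hstep, hca]
              have : a :: cs = (a :: pre') ++ (cs.foldl stepT c) :: suf := by
                simpa using congrArg (a :: ·) hc.2
              simpa using congrArg (c :: ·) this
            · intro y hy
              rw [hstep, hca]
              rcases List.mem_cons.1 hy with rfl | hy
              · exact hrc
              · rcases List.mem_cons.1 hy with rfl | hy
                · exact lt_of_lt_of_le hrc (le_of_not_gt h)
                · exact hpre y (List.mem_cons_of_mem _ hy)
            · intro y hy
              rw [hstep, hca]
              rcases List.mem_cons.1 hy with rfl | hy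
              · exact hmin _ (List.mem_cons_self ..)
              · rcases List.mem_cons.1 hy with rfl | hy
                · exact le_trans (le_of_lt hrc) (le_of_not_gt h)
                · exact hmin y (List.mem_cons_of_mem _ hy)

-- sorting on two keys is sorting on the lexicographic pair key
theorem sorted2_eq_sorted_lex {α : Type} (xs : List α) (k1 k2 : α → Int) :
    PySem.List.sorted2 xs k1 k2 = PySem.List.sorted xs (fun t => toLex (k1 t, k2 t)) := by
  unfold PySem.List.sorted2 PySem.List.sorted
  simp only [if_neg (by decide : ¬ (false = true))]
  congr 1
  funext acc x
  congr 1
  funext a b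
  by_cases h1 : k1 a < k1 b <;> by_cases h2 : k1 b < k1 a <;> by_cases h3 : k2 a < k2 b <;>
    simp [h1, h2, h3, Prod.Lex.lt_iff] <;> omega

-- with strictly increasing indices, the head of the (score, index)-sort is the
-- first element of minimal score — exactly A's running-min result
theorem sorted2_head_eq (c : Int × Int × Int) (cs : List (Int × Int × Int))
    (hpw : (c :: cs).Pairwise (fun a b => a.2.1 < b.2.1))
    (m : Int × Int × Int) (t : List (Int × Int × Int))
    (hs : PySem.List.sorted2 (c :: cs) (fun t => t.1) (fun t => t.2.1) = m :: t) :
    m = cs.foldl stepT c := by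
  rw [sorted2_eq_sorted_lex] at hs
  have hm_mem : m ∈ c :: cs := by
    have := PySem.List.sorted_perm (c :: cs) (fun t : Int × Int × Int => toLex (t.1, t.2.1)) false
    exact this.mem_iff.1 (hs ▸ List.mem_cons_self ..)
  have hle := PySem.List.key_head_sorted_le (c :: cs) (fun t : Int × Int × Int => toLex (t.1, t.2.1)) hs
  obtain ⟨pre, suf, heq, hpre, hmin⟩ := foldl_stepT_spec cs c
  set r := cs.foldl stepT c with hr
  have hr_mem : r ∈ c :: cs := heq ▸ List.mem_append_right pre (List.mem_cons_self ..)
  have hlex := hle r hr_mem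
  rw [Prod.Lex.le_iff] at hlex
  have hsc : r.1 ≤ m.1 := hmin m hm_mem
  have hm1 : m.1 = r.1 := by
    rcases hlex with h | h
    · exact absurd h (not_lt.2 hsc)
    · exact h.1
  have hm2 : m.2.1 ≤ r.2.1 := by
    rcases hlex with h | h
    · exact absurd h (not_lt.2 hsc)
    · exact h.2
  have hm_split : m ∈ pre ++ r :: suf := heq ▸ hm_mem
  rcases List.mem_append.1 hm_split with hmp | hms
  · exact absurd (hpre m hmp) (by omega)
  · rcases List.mem_cons.1 hms with rfl | hms
    · rfl
    · have hpw' : (pre ++ r :: suf).Pairwise (fun a b => a.2.1 < b.2.1) := heq ▸ hpw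
      have : r.2.1 < m.2.1 :=
        (List.pairwise_cons.1 (List.pairwise_append.1 hpw').2.1).1 m hms
      omega
-- projecting triples to A's (node, score) pairs commutes with the first-min fold
theorem foldl_proj :
    ∀ (cs : List (Int × Int × Int)) (c : Int × Int × Int),
      (cs.map (fun t => ((t.2.2, t.1) : Int × Int))).foldl
          (fun b q => if q.2 < b.2 then q else b) (c.2.2, c.1)
        = ((cs.foldl stepT c).2.2, (cs.foldl stepT c).1) := by
  intro cs
  induction cs with
  | nil => intro c; rfl
  | cons a cs ih =>
      intro c
      simp only [List.map_cons, List.foldl_cons]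
      by_cases h : a.1 < c.1
      · rw [show (if ((a.2.2, a.1) : Int × Int).2 < ((c.2.2, c.1) : Int × Int).2
              then ((a.2.2, a.1) : Int × Int) else (c.2.2, c.1)) = (a.2.2, a.1) from if_pos h,
            show stepT c a = a from if_pos h]
        exact ih a
      · rw [show (if ((a.2.2, a.1) : Int × Int).2 < ((c.2.2, c.1) : Int × Int).2
              then ((a.2.2, a.1) : Int × Int) else (c.2.2, c.1)) = (c.2.2, c.1) from if_neg h,
            show stepT c a = c from if_neg h]
        exact ih c

-- ===== VERDICT (by name: the statement is the Claim_ definition above) =====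
theorem select_next_node_spec : Claim_equal_select_next_node := by
  intro G current_node visited _ hpre
  unfold Spec_select_next_node select_next_node select_next_node_alt
  rcases hpre with ⟨_, hinner, _⟩
  rw [outerA_eq current_node visited G hinner, sel_eq]
  simp only [cands_eq]
  cases hSE : (PySem.List.enumerate G 0).filterMap (triB current_node visited) with
  | nil =>
      have hS : G.filterMap (entryB current_node visited) = [] := by
        rw [← tris_map_eq G current_node visited, hSE]; rfl
      rw [hS]
      rfl
  | cons c cs =>
      have hS : G.filterMap (entryB current_node visited) = (c.2.2, c.1) :: cs.map (fun t => ((t.2.2, t.1) : Int × Int)) := by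
        rw [← tris_map_eq G current_node visited, hSE, List.map_cons]
      rw [hS]
      have hpw : (c :: cs).Pairwise (fun a b => a.2.1 < b.2.1) := hSE ▸ tris_pairwise G current_node visited
      cases hs : PySem.List.sorted2 (c :: cs) (fun t => t.1) (fun t => t.2.1) with
      | nil =>
          rw [sorted2_eq_sorted_lex] at hs
          exact absurd ((PySem.List.sorted_eq_nil_iff _ _ _).1 hs) (by simp)
      | cons m t =>
          have hm := sorted2_head_eq c cs hpw m t hs
          simp only []
          rw [foldl_proj cs c, hm]
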